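-- pv_equiv track=rewrite | github.com/yukinorong/nonebot2_dota2 | plugins/dota2_watch_config.py | _normalize_group_map
-- ===== SOURCE A (Python) =====
-- from typing import Any
--
-- def _normalize_group_map(raw: Any) -> dict[str, list[int]]:
--     if not isinstance(raw, dict):
--         return {}
--     normalized: dict[str, list[int]] = {}
--     for key, value in raw.items():
--         account_id = str(key).strip()
--         if not account_id:
--             continue
--         raw_group_ids = value if isinstance(value, list) else [value]
--         group_ids: list[int] = []
--         seen: set[int] = set()
--         for item in raw_group_ids:
--             try:
--                 group_id = int(item)
--             except (TypeError, ValueError):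
--                 continue
--             if group_id not in seen:
--                 group_ids.append(group_id)
--                 seen.add(group_id)
--         if group_ids:
--             normalized[account_id] = group_ids
--     return normalized
-- ===== SOURCE B (Python) =====
-- from typing import Any
--
--
-- def _parse_ints(value: Any) -> list[int]:
--     items = value if isinstance(value, list) else [value]
--     parsed: list[int] = []
--     for item in items:
--         try:
--             parsed.append(int(item))
--         except (TypeError, ValueError):
--             pass
--     return parsed
--
--
-- def _dedup_first(values: list[int]) -> list[int]:
--     # Selection-style dedup: take the front element, then purge every later
--     # copy of it from the remainder; no seen-set or membership test is needed.
--     result: list[int] = []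
--     rest = values
--     while rest:
--         head = rest[0]
--         result.append(head)
--         rest = [x for x in rest[1:] if x != head]
--     return result
--
--
-- def _normalize_group_map(raw: Any) -> dict[str, list[int]]:
--     if not isinstance(raw, dict):
--         return {}
--     pairs = [(str(key).strip(), _dedup_first(_parse_ints(value)))
--              for key, value in raw.items()]
--     return {k: v for k, v in pairs if k and v}
-- ===== Notes on version B (the rewrite author's own statement) =====
-- stated objective: alternative
-- what changed: Replaces A's fused seen-set loop (hash-set membership test plus manual append) by staged passes with a selection-style dedup: parse ints first, then repeatedly take the front element and purge its later copies from the remainder by filtering, and assemble the result with a dict comprehension over the cleaned pairs.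
import Mathlib
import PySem

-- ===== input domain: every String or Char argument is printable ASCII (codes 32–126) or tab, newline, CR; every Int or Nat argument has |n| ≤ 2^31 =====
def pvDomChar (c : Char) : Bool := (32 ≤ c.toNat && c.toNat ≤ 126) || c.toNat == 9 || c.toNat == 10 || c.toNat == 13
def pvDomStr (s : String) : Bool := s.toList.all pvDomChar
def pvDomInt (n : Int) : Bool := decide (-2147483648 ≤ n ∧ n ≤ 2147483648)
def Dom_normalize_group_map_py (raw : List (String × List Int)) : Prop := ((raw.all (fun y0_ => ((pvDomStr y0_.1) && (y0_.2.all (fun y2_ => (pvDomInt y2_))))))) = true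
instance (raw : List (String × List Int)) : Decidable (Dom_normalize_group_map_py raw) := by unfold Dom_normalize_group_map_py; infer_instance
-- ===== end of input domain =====

-- B replaces A's fused seen-set loop by staged passes with a selection-style dedup
-- (take the front element, purge its later copies by filtering); same result, no speed claim.
-- The assoc-list input models the Python dict argument via Dict.ofList (duplicate keys collapse as Python's dict does).

-- ===== PORT A =====
def normalize_group_map_py (raw : List (String × List Int)) : List (String × List Int) :=
  ((PySem.Dict.ofList raw).items.foldl
    (fun (normalized : PySem.Dict String (List Int)) kv =>
      let account_id := PySem.Str.strip kv.1   -- str(key).strip(); key is already a str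
      if account_id = "" then normalized
      else
        -- value is typed list[int] here, so 'value if isinstance(value, list) else [value]' is value,
        -- and int(item) is the identity and never raises on an int
        let st := kv.2.foldl
          (fun (st : List Int × PySem.Set Int) item =>
            if PySem.Set.contains st.2 item then st
            else (st.1 ++ [item], PySem.Set.add st.2 item))
          ([], PySem.Set.empty)
        if st.1 = [] then normalized
        else normalized.insert account_id st.1)
    PySem.Dict.empty).items

-- ===== PORT B =====
-- _parse_ints: value is typed list[int], so the isinstance branch takes the list
-- and int(item) is the identity and never raises; the append loop is this fold
def pvParseInts (value : List Int) : List Int :=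
  value.foldl (fun parsed item => parsed ++ [item]) []

-- _dedup_first: while rest: take head, purge its copies from the remainder
def pvDedupLoop (result rest : List Int) : List Int :=
  match rest with
  | [] => result
  | head :: t => pvDedupLoop (result ++ [head]) (t.filter (fun x => x != head))
termination_by rest.length
decreasing_by
  simp only [List.length_cons, List.length_unattach]
  exact Nat.lt_succ_of_le (le_trans (List.length_filter_le _ _) (by simp))

def pvCleanPair (kv : String × List Int) : String × List Int :=
  (PySem.Str.strip kv.1, pvDedupLoop [] (pvParseInts kv.2))

def normalize_group_map_py_alt (raw : List (String × List Int)) : List (String × List Int) :=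
  let pairs := (PySem.Dict.ofList raw).items.map pvCleanPair
  (PySem.Dict.ofList
    (pairs.filter (fun p => (p.1 != "") && (p.2 != ([] : List Int))))).items

-- ===== PRECONDITION & SPEC =====
def Spec_normalize_group_map_py (raw : List (String × List Int)) (out : List (String × List Int)) : Prop := out = normalize_group_map_py_alt raw
instance (raw : List (String × List Int)) (out : List (String × List Int)) : Decidable (Spec_normalize_group_map_py raw out) := by unfold Spec_normalize_group_map_py; infer_instance

-- ===== CLAIM (what is proved, stated in full; the proofs are below) =====
def Claim_equal_normalize_group_map_py : Prop := ∀ (raw : List (String × List Int)), Dom_normalize_group_map_py raw → Spec_normalize_group_map_py raw (normalize_group_map_py raw)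

-- ===== LEMMAS AND PROOFS =====

-- the append loop of _parse_ints is the identity on a list
theorem pvParseInts_id (l : List Int) : pvParseInts l = l := by
  unfold pvParseInts
  induction l using List.reverseRecOn with
  | nil => rfl
  | append_singleton t x ih => rw [List.foldl_append, ih]; rfl

-- purging an element commutes with set-of-list formation
theorem ofList_filter_ne (x : Int) (t : List Int) :
    PySem.Set.ofList (t.filter (fun y => y != x)) = PySem.Set.discard (PySem.Set.ofList t) x := by
  induction t with
  | nil => rfl
  | cons y t ih =>
    by_cases hyx : y = x
    · subst hyx
      simp only [List.filter_cons, bne_self_eq_false, Bool.false_eq_true, if_false, ih,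
        PySem.Set.ofList_cons, PySem.Set.discard, List.filter_cons, beq_self_eq_true,
        Bool.not_true, Bool.false_eq_true, if_false]
      simp [List.filter_filter]
    · have hb : (y != x) = true := by simp [hyx]
      simp only [List.filter_cons, hb, if_true, PySem.Set.ofList_cons, ih]
      simp [PySem.Set.discard, List.filter_filter, Bool.and_comm, hyx]

-- the selection-style while loop computes ordered dedup (first occurrences)
theorem pvDedupLoop_eq_aux : ∀ (n : Nat) (rest : List Int), rest.length ≤ n →
    ∀ (result : List Int), pvDedupLoop result rest = result ++ PySem.Set.ofList rest := by
  intro n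
  induction n with
  | zero =>
    intro rest h result
    have : rest = [] := List.eq_nil_of_length_eq_zero (Nat.le_zero.mp h)
    subst this
    simp [pvDedupLoop, PySem.Set.ofList]
  | succ n ih =>
    intro rest h result
    match rest with
    | [] => simp [pvDedupLoop, PySem.Set.ofList]
    | head :: t =>
      rw [pvDedupLoop,
        ih _ (le_trans (List.length_filter_le _ _) (by simpa using Nat.le_of_succ_le_succ h)) _,
        ofList_filter_ne, PySem.Set.ofList_cons]
      simp [PySem.Set.discard]

theorem pvDedupLoop_eq (result rest : List Int) :
    pvDedupLoop result rest = result ++ PySem.Set.ofList rest :=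
  pvDedupLoop_eq_aux rest.length rest le_rfl result

-- folding inserts over a filtered map equals the guarded fold over the original list
theorem pv_filter_map_fold (l : List (String × List Int)) :
    ∀ (d : PySem.Dict String (List Int)),
      ((l.map pvCleanPair).filter (fun p => (p.1 != "") && (p.2 != ([] : List Int)))).foldl
        (fun (d : PySem.Dict String (List Int)) p => d.insert p.1 p.2) d
      = l.foldl
        (fun (d : PySem.Dict String (List Int)) kv =>
          let p := pvCleanPair kv
          if (p.1 != "") && (p.2 != ([] : List Int)) then d.insert p.1 p.2 else d) d := by
  induction l with
  | nil => intro d; rfl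
  | cons kv l ih =>
    intro d
    by_cases h : (((pvCleanPair kv).1 != "") && ((pvCleanPair kv).2 != ([] : List Int))) = true
    · simp only [List.map_cons, List.filter_cons, h, if_true, List.foldl_cons]
      exact ih _
    · rw [Bool.not_eq_true] at h
      simp only [List.map_cons, List.filter_cons, List.foldl_cons, h, Bool.false_eq_true,
        if_false]
      exact ih d

-- Dict.ofList is definitionally the insert fold, so B's dict comprehension is the guarded fold
theorem pv_alt_items (l : List (String × List Int)) :
    (PySem.Dict.ofList
        ((l.map pvCleanPair).filter (fun p => (p.1 != "") && (p.2 != ([] : List Int))))).items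
    = (l.foldl
        (fun (d : PySem.Dict String (List Int)) kv =>
          let p := pvCleanPair kv
          if (p.1 != "") && (p.2 != ([] : List Int)) then d.insert p.1 p.2 else d)
        PySem.Dict.empty).items := by
  have : PySem.Dict.ofList
      ((l.map pvCleanPair).filter (fun p => (p.1 != "") && (p.2 != ([] : List Int))))
      = ((l.map pvCleanPair).filter (fun p => (p.1 != "") && (p.2 != ([] : List Int)))).foldl
          (fun (d : PySem.Dict String (List Int)) p => d.insert p.1 p.2) PySem.Dict.empty := rfl
  rw [this, pv_filter_map_fold]

-- A's fused seen-set loop computes ordered dedup (invariant: seen = collected list)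
theorem pv_inner_fold (l : List Int) :
    ∀ (acc : PySem.Set Int),
      (l.foldl
        (fun (st : List Int × PySem.Set Int) item =>
          if PySem.Set.contains st.2 item then st
          else (st.1 ++ [item], PySem.Set.add st.2 item))
        (acc, acc)).1 = PySem.Set.update acc l := by
  induction l with
  | nil => intro acc; simp [PySem.Set.update]
  | cons x l ih =>
    intro acc
    by_cases hx : x ∈ acc
    · have hc : PySem.Set.contains acc x = true := (PySem.Set.contains_iff _ _).2 hx
      simp only [List.foldl_cons, hc, if_true, PySem.Set.update_cons,
        PySem.Set.add_of_mem hx]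
      exact ih acc
    · have hc : PySem.Set.contains acc x = false := by
        by_contra h
        exact hx ((PySem.Set.contains_iff _ _).1 (by revert h; cases PySem.Set.contains acc x <;> simp))
      simp only [List.foldl_cons, hc, Bool.false_eq_true, if_false,
        PySem.Set.update_cons]
      have := ih (PySem.Set.add acc x)
      rw [PySem.Set.add_of_not_mem hx] at this ⊢
      exact this

-- both inner computations produce the same deduped list
theorem pv_inner_same (l : List Int) :
    (l.foldl
      (fun (st : List Int × PySem.Set Int) item =>
        if PySem.Set.contains st.2 item then st
        else (st.1 ++ [item], PySem.Set.add st.2 item))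
      ([], PySem.Set.empty)).1 = pvDedupLoop [] (pvParseInts l) := by
  rw [pvParseInts_id, pvDedupLoop_eq, List.nil_append]
  have h := pv_inner_fold l PySem.Set.empty
  exact h.trans (PySem.Set.update_nil_left l)

-- ===== VERDICT (by name: the statement is the Claim_ definition above) =====
theorem normalize_group_map_py_spec : Claim_equal_normalize_group_map_py := by
  intro raw _
  unfold Spec_normalize_group_map_py normalize_group_map_py normalize_group_map_py_alt
  dsimp only
  rw [pv_alt_items]
  congr 1
  apply PySem.List.foldl_congr_mem
  intro d kv _
  dsimp only
  rw [pv_inner_same]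
  simp only [pvCleanPair]
  by_cases h1 : PySem.Str.strip kv.1 = ""
  · simp [h1]
  · by_cases h2 : pvDedupLoop [] (pvParseInts kv.2) = ([] : List Int)
    · simp [h1, h2]
    · simp [h1, h2]
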